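-- pv_equiv track=rewrite | github.com/EbanksRobert/Ebanks-Git-Readme | Number Theory/N7_Quadratic_Ebanks.py | Res
-- ===== SOURCE A (Python) =====
-- def Res(x):#turned this into a def function because i already had it written out before I tried to use arrays
--     h=[]
--     l=[]
--     m=x
--     for i in range(0,m):
--         for ii in range(0,m**2):
--             if (ii**2)%m == i:
--                 l.append(i)
--     for v in l:
--         if v not in h:
--             h.append(v)
--     return(len(h))
-- ===== SOURCE B (Python) =====
-- def Res(x):
--     s = sorted(ii * ii % x for ii in range(x))
--     c = 0
--     prev = None
--     for v in s:
--         if prev is None or v != prev: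
--             c += 1
--             prev = v
--     return c
-- ===== Notes on version B (the rewrite author's own statement) =====
-- stated objective: faster
-- what changed: Replaces A's O(m^3) scheme (for each candidate residue i, scan all ii in range(m**2) and re-dedup by linear membership) with squaring only range(m), sorting, and counting distinct values in one adjacent-comparison pass.
import Mathlib
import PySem

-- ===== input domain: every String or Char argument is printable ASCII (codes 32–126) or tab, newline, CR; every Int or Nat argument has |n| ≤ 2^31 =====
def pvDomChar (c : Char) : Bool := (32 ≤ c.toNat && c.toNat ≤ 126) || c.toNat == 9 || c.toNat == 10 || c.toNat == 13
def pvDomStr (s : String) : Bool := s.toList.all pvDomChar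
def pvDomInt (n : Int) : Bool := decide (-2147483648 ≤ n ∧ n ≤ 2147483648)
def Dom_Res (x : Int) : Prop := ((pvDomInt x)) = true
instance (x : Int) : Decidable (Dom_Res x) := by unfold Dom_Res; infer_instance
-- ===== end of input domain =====

-- B replaces A's O(m^3) scan-and-membership-dedup with sort-then-adjacent-distinct counting (measurably faster, asymptotic change).

-- ===== PORT A =====
def Res (x : Int) : Int :=
  let m := x
  let l : List Int :=
    (PySem.List.pyRange 0 m 1).foldl (fun acc i =>
      (PySem.List.pyRange 0 (m ^ 2) 1).foldl (fun acc2 ii =>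
        if PySem.Int.mod (ii ^ 2) m = i then acc2 ++ [i] else acc2) acc) []
  let h : List Int := l.foldl (fun h v => if v ∈ h then h else h ++ [v]) []
  (h.length : Int)

-- ===== PORT B =====
-- the body of B's for-loop (state: (count, prev))
def bstep (st : Int × Option Int) (v : Int) : Int × Option Int :=
  match st.2 with
  | none => (st.1 + 1, some v)
  | some p => if v ≠ p then (st.1 + 1, some v) else (st.1, some p)

def Res_alt (x : Int) : Int :=
  let s : List Int :=
    PySem.List.sorted ((PySem.List.pyRange 0 x 1).map (fun ii => PySem.Int.mod (ii * ii) x))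
      (fun v => v) false
  (s.foldl bstep (0, none)).1

-- ===== PRECONDITION & SPEC =====
def Spec_Res (x : Int) (out : Int) : Prop := out = Res_alt x
instance (x : Int) (out : Int) : Decidable (Spec_Res x out) := by unfold Spec_Res; infer_instance

-- ===== CLAIM (what is proved, stated in full; the proofs are below) =====
def Claim_equal_Res : Prop := ∀ (x : Int), Dom_Res x → Spec_Res x (Res x)

-- ===== LEMMAS AND PROOFS =====

-- generic loop shapes
lemma foldl_ite_append_const {α β : Type} (p : α → Prop) [DecidablePred p] (b : β) :
    ∀ (L : List α) (acc : List β),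
      L.foldl (fun a x => if p x then a ++ [b] else a) acc
        = acc ++ (L.filter (fun x => decide (p x))).map (fun _ => b) := by
  intro L
  induction L with
  | nil => intro acc; simp
  | cons y t ih =>
    intro acc
    by_cases hy : p y <;> simp [hy, ih]

lemma foldl_append_blocks {α β : Type} (g : α → List β) :
    ∀ (L : List α) (acc : List β),
      L.foldl (fun a i => a ++ g i) acc = acc ++ L.flatMap g := by
  intro L
  induction L with
  | nil => intro acc; simp
  | cons y t ih => intro acc; simp [ih]

-- two small Finset identities used below
lemma card_insert_eq_card_erase_add_one (v : Int) (S : Finset Int) :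
    (insert v S).card = (S.erase v).card + 1 := by
  have h1 : insert v S = insert v (S.erase v) := by
    ext a; simp; tauto
  rw [h1, Finset.card_insert_of_notMem (Finset.notMem_erase v _)]

lemma sdiff_insert_eq_erase_sdiff (R H : Finset Int) (v : Int) :
    R \ insert v H = (R \ H).erase v := by
  ext a; simp; tauto

-- A's dedup loop counts the distinct elements not already collected
lemma dedupFold :
    ∀ (l h : List Int), (l.foldl (fun h v => if v ∈ h then h else h ++ [v]) h).length
      = h.length + (l.toFinset \ h.toFinset).card := by
  intro l
  induction l with
  | nil => intro h; simp
  | cons v rest ih =>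
    intro h
    simp only [List.foldl_cons]
    by_cases hv : v ∈ h
    · rw [if_pos hv, ih h]
      have : (v :: rest).toFinset \ h.toFinset = rest.toFinset \ h.toFinset := by
        ext a
        simp only [List.toFinset_cons, Finset.mem_sdiff, Finset.mem_insert, List.mem_toFinset]
        constructor
        · rintro ⟨h1 | h1, h2⟩
          · exact absurd (h1 ▸ hv) h2
          · exact ⟨h1, h2⟩
        · rintro ⟨h1, h2⟩
          exact ⟨Or.inr h1, h2⟩
      rw [this]
    · rw [if_neg hv, ih (h ++ [v])]
      have hvt : v ∉ h.toFinset := by simpa using hv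
      have e1 : (h ++ [v]).toFinset = insert v h.toFinset := by
        ext a; simp
      have e2 : (v :: rest).toFinset \ h.toFinset = insert v (rest.toFinset \ h.toFinset) := by
        ext a
        simp only [List.toFinset_cons, Finset.mem_sdiff, Finset.mem_insert, List.mem_toFinset]
        constructor
        · rintro ⟨h1 | h1, h2⟩
          · exact Or.inl h1
          · exact Or.inr ⟨h1, h2⟩
        · rintro (h1 | ⟨h1, h2⟩)
          · exact ⟨Or.inl h1, h1 ▸ hv⟩
          · exact ⟨Or.inr h1, h2⟩
      rw [e1, e2, sdiff_insert_eq_erase_sdiff, card_insert_eq_card_erase_add_one]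
      simp
      omega

-- B's pass over a sorted tail: counts distinct elements other than prev
lemma countGo :
    ∀ (s : List Int) (p c : Int), s.Pairwise (· ≤ ·) → (∀ v ∈ s, p ≤ v) →
      (s.foldl bstep (c, some p)).1 = c + ((s.toFinset.erase p).card : Int) := by
  intro s
  induction s with
  | nil => intro p c _ _; simp
  | cons v rest ih =>
    intro p c hpw hlb
    have hpw' := (List.pairwise_cons.mp hpw).2
    have hhd := (List.pairwise_cons.mp hpw).1
    simp only [List.foldl_cons]
    by_cases hvp : v = p
    · subst hvp
      have : bstep (c, some v) v = (c, some v) := by simp [bstep]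
      rw [this, ih v c hpw' hhd]
      have : ((v :: rest).toFinset).erase v = rest.toFinset.erase v := by
        ext a
        simp only [Finset.mem_erase, List.toFinset_cons, Finset.mem_insert, List.mem_toFinset]
        constructor
        · rintro ⟨h1, h2 | h2⟩
          · exact absurd h2 h1
          · exact ⟨h1, h2⟩
        · rintro ⟨h1, h2⟩
          exact ⟨h1, Or.inr h2⟩
      rw [this]
    · have hb : bstep (c, some p) v = (c + 1, some v) := by simp [bstep, hvp]
      rw [hb, ih v (c + 1) hpw' hhd]
      have hpv : p < v := lt_of_le_of_ne (hlb v (by simp)) (Ne.symm hvp)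
      have hnp : p ∉ (v :: rest).toFinset := by
        simp only [List.toFinset_cons, Finset.mem_insert, List.mem_toFinset]
        rintro (h1 | h1)
        · exact absurd h1.symm (ne_of_gt hpv)
        · exact absurd (hhd p h1) (by omega)
      rw [Finset.erase_eq_of_notMem hnp]
      have : (v :: rest).toFinset = insert v rest.toFinset := by simp
      rw [this, card_insert_eq_card_erase_add_one]
      push_cast
      ring

-- B computes the number of distinct squares mod m of range(m)
lemma Res_alt_eq (x : Int) :
    Res_alt x
      = ((((PySem.List.pyRange 0 x 1).map (fun ii => PySem.Int.mod (ii * ii) x)).toFinset.card : Int)) := by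
  unfold Res_alt
  set s0 : List Int := (PySem.List.pyRange 0 x 1).map (fun ii => PySem.Int.mod (ii * ii) x) with hs0
  set s : List Int := PySem.List.sorted s0 (fun v => v) false with hs
  have hperm : s.Perm s0 := PySem.List.sorted_perm ..
  have htf : s.toFinset = s0.toFinset := List.toFinset_eq_of_perm _ _ hperm
  have hpw : s.Pairwise (· ≤ ·) := by
    have := PySem.List.sorted_pairwise (xs := s0) (key := fun v => v)
    simpa [hs] using this
  rw [← htf]
  cases hcase : s with
  | nil => simp
  | cons v rest =>
    rw [hcase] at hpw
    have hpw' := (List.pairwise_cons.mp hpw).2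
    have hhd := (List.pairwise_cons.mp hpw).1
    simp only [List.foldl_cons]
    have : bstep (0, none) v = (1, some v) := by simp [bstep]
    rw [this, countGo rest v 1 hpw' hhd]
    have : (v :: rest).toFinset = insert v rest.toFinset := by simp
    rw [this, card_insert_eq_card_erase_add_one]
    push_cast
    ring

-- A computes the number of distinct collected residues
lemma Res_eq (x : Int) :
    Res x
      = ((((PySem.List.pyRange 0 x 1).flatMap (fun i =>
            ((PySem.List.pyRange 0 (x ^ 2) 1).filter
              (fun ii => decide (PySem.Int.mod (ii ^ 2) x = i))).map (fun _ => i))).toFinset.card : Int)) := by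
  simp only [Res]
  rw [show (fun (acc : List Int) (i : Int) =>
        (PySem.List.pyRange 0 (x ^ 2) 1).foldl (fun acc2 ii =>
          if PySem.Int.mod (ii ^ 2) x = i then acc2 ++ [i] else acc2) acc)
      = (fun acc i => acc ++ ((PySem.List.pyRange 0 (x ^ 2) 1).filter
          (fun ii => decide (PySem.Int.mod (ii ^ 2) x = i))).map (fun _ => i)) from
    funext fun acc => funext fun i => foldl_ite_append_const _ i _ acc]
  rw [foldl_append_blocks]
  rw [dedupFold]
  simp

-- the two underlying value sets coincide (periodicity of squares mod m)
lemma set_eq (x : Int) (hx : 0 < x) :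
    ((PySem.List.pyRange 0 x 1).flatMap (fun i =>
        ((PySem.List.pyRange 0 (x ^ 2) 1).filter
          (fun ii => decide (PySem.Int.mod (ii ^ 2) x = i))).map (fun _ => i))).toFinset
      = ((PySem.List.pyRange 0 x 1).map (fun ii => PySem.Int.mod (ii * ii) x)).toFinset := by
  ext v
  simp only [List.mem_toFinset, List.mem_flatMap, List.mem_map, List.mem_filter,
    PySem.List.mem_pyRange_one, decide_eq_true_eq]
  constructor
  · rintro ⟨i, ⟨hi0, him⟩, ⟨ii, ⟨⟨hii0, hii2⟩, hmod⟩, hvi⟩⟩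
    subst hvi
    refine ⟨PySem.Int.mod ii x, ⟨PySem.Int.mod_nonneg _ hx, PySem.Int.mod_lt _ hx⟩, ?_⟩
    rw [← hmod]
    rw [PySem.Int.mod_eq_emod_of_pos hx, PySem.Int.mod_eq_emod_of_pos hx,
        PySem.Int.mod_eq_emod_of_pos hx]
    rw [show ii ^ 2 = ii * ii from sq ii]
    conv_rhs => rw [Int.mul_emod]
  · rintro ⟨ii, ⟨hii0, hiim⟩, hv⟩
    refine ⟨v, ⟨?_, ?_⟩, ⟨ii, ⟨⟨hii0, ?_⟩, ?_⟩, rfl⟩⟩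
    · rw [← hv]; exact PySem.Int.mod_nonneg _ hx
    · rw [← hv]; exact PySem.Int.mod_lt _ hx
    · nlinarith
    · rw [← hv, show ii ^ 2 = ii * ii from sq ii]

-- ===== VERDICT (by name: the statement is the Claim_ definition above) =====
theorem Res_spec : Claim_equal_Res := by
  intro x _
  unfold Spec_Res
  by_cases hx : 0 < x
  · rw [Res_eq, Res_alt_eq, set_eq x hx]
  · have hnil : PySem.List.pyRange 0 x 1 = [] :=
      PySem.List.pyRange_one_eq_nil (by omega)
    rw [Res_eq, Res_alt_eq, hnil]
    simp
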